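-- pv_equiv track=rewrite | github.com/ismails2/Algorithm-and-Data-Structures | CodingChallenges/CC5/solution.py | look_direction
-- ===== SOURCE A (Python) =====
-- from typing import List
--
-- def look_direction(walls: List[int]) -> List[int]:
--     """
--     Extra function that can look in one direction to see which walls are visible
--     param: List of ints, the walls heights in order
--     result: List of ints, the number of walls visible
--     """
--     look = []
--     stack = []
--     look.append(0)
--     stack.append(walls[0])
--     max_left = walls[0]
--     for i in range(1, len(walls)):
--         if max_left < walls[i]:
--             max_left = walls[i]
--             stack.clear()
--         elif walls[i] >= stack[-1]:
--             while walls[i] >= stack[-1]: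
--                 stack.pop()
--                 if len(stack) == 0:
--                     break
--         look.append(len(stack))
--         stack.append(walls[i])
--     return look
-- ===== SOURCE B (Python) =====
-- def look_direction(walls):
--     look = []
--     for i in range(len(walls)):
--         m = walls[i]
--         cnt = 0
--         for j in range(i - 1, -1, -1):
--             if walls[j] > m:
--                 m = walls[j]
--                 cnt += 1
--         look.append(cnt)
--     return look
-- ===== Notes on version B (the rewrite author's own statement) =====
-- stated objective: simpler
-- what changed: Replaces the monotonic stack with a per-index leftward scan that counts strict running maxima; the shared mutable stack state disappears.
import Mathlib
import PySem

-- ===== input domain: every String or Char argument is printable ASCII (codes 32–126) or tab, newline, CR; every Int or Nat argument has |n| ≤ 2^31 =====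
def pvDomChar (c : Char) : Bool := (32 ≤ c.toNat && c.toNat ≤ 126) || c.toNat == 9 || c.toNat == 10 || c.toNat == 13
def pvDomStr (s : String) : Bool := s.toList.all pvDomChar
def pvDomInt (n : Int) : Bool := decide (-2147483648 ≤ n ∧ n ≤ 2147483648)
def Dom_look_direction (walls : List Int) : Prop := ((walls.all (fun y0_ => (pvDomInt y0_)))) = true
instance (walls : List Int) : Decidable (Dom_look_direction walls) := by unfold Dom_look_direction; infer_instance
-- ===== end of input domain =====

-- B replaces A's monotonic stack with an independent leftward scan per index (simpler: no shared
-- mutable stack state); equivalence of return values is proved for nonempty input (A raises on []).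

-- ===== PORT A =====
-- A's stack is kept top-first (Python stack[-1] = head). 'popAll' is the elif + inner while
-- of A: pop while walls[i] >= stack[-1], stopping when the stack empties; when the initial
-- comparison fails it leaves the stack unchanged, exactly like A's elif guard.
def popAll (w : Int) : List Int → List Int
  | [] => []
  | t :: s => if w ≥ t then popAll w s else t :: s

-- the for-loop over i in range(1, len(walls)); the remaining list is walls[i:],
-- state = (max_left, stack); each step emits look's new entry len(stack).
def lookGo (maxl : Int) (stack : List Int) : List Int → List Int
  | [] => []
  | w :: rest =>
      if maxl < w then
        (0 : Int) :: lookGo w [w] rest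
      else
        let s := popAll w stack
        ((s.length : Int)) :: lookGo maxl (w :: s) rest

def look_direction (walls : List Int) : List Int :=
  match walls with
  | [] => []  -- Python raises IndexError at walls[0]; excluded by Pre_look_direction
  | w0 :: rest => (0 : Int) :: lookGo w0 [w0] rest

-- ===== PORT B =====
-- inner loop of B: scan the reversed prefix (j = i-1 down to 0), counting strict new maxima
def bCount (m : Int) (cnt : Int) : List Int → Int
  | [] => cnt
  | x :: xs => if x > m then bCount x (cnt + 1) xs else bCount m cnt xs

def look_direction_alt (walls : List Int) : List Int :=
  (List.range walls.length).map
    (fun i => bCount (walls.getD i 0) 0 ((walls.take i).reverse))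

-- ===== PRECONDITION & SPEC =====
-- Pre_ excludes only the empty list, on which A raises IndexError (walls[0]).
def Pre_look_direction (walls : List Int) : Prop := walls ≠ []
instance (walls : List Int) : Decidable (Pre_look_direction walls) := by
  unfold Pre_look_direction; infer_instance

def pvWitness_look_direction : List Int := [3, 1, 2]

def Spec_look_direction (walls : List Int) (out : List Int) : Prop := out = look_direction_alt walls
instance (walls : List Int) (out : List Int) : Decidable (Spec_look_direction walls out) := by
  unfold Spec_look_direction; infer_instance

-- ===== CLAIM (what is proved, stated in full; the proofs are below) =====
def Claim_equal_look_direction : Prop := ∀ (walls : List Int), Dom_look_direction walls → Pre_look_direction walls → Spec_look_direction walls (look_direction walls)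

-- ===== LEMMAS AND PROOFS =====

-- 'recs p' = the strict running maxima of p scanned head-first (p is the reversed prefix):
-- the values visible looking left. It is A's stack and also what B's inner loop counts above m.
def recs : List Int → List Int
  | [] => []
  | x :: xs => x :: (recs xs).filter (fun a => decide (x < a))

-- common reference: out entry for next wall w with reversed prefix p
def cnt (w : Int) (p : List Int) : Int :=
  (((recs p).filter (fun a => decide (w < a))).length : Int)

def g (p : List Int) : List Int → List Int
  | [] => []
  | w :: l => cnt w p :: g (w :: p) l

theorem recs_subset (p : List Int) : ∀ x ∈ recs p, x ∈ p := by
  induction p with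
  | nil => simp [recs]
  | cons a as ih =>
      intro x hx
      simp [recs] at hx
      rcases hx with h | h
      · simp [h]
      · exact List.mem_cons_of_mem _ (ih x h.1)

theorem recs_sorted (p : List Int) : (recs p).Pairwise (· < ·) := by
  induction p with
  | nil => simp [recs]
  | cons a as ih =>
      simp only [recs]
      refine List.Pairwise.cons ?_ (ih.filter _)
      intro b hb
      have := List.of_mem_filter hb
      simpa using this

theorem popAll_eq_filter (w : Int) (l : List Int) (h : l.Pairwise (· < ·)) :
    popAll w l = l.filter (fun a => decide (w < a)) := by
  induction l with
  | nil => simp [popAll]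
  | cons t s ih =>
      rcases List.pairwise_cons.mp h with ⟨ht, hs⟩
      by_cases hw : w ≥ t
      · have : ¬ (w < t) := by omega
        simp [popAll, hw, this, ih hs]
      · have h1 : w < t := by omega
        have : s.filter (fun a => decide (w < a)) = s := by
          apply List.filter_eq_self.mpr
          intro a ha
          have := ht a ha
          simp; omega
        simp [popAll, hw, h1, this]

theorem bCount_eq (p : List Int) : ∀ (m c : Int), bCount m c p = c + cnt m p := by
  induction p with
  | nil => intro m c; simp [bCount, cnt, recs]
  | cons x xs ih =>
      intro m c
      by_cases hx : x > m
      · have hfilt : (recs xs).filter (fun a => decide (m < a) && decide (x < a))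
            = (recs xs).filter (fun a => decide (x < a)) := by
          apply List.filter_congr
          intro a _
          by_cases h : x < a
          · have hma : m < a := by omega
            simp [h, hma]
          · simp [h]
        simp only [bCount, if_pos hx, ih, cnt, recs, List.filter_cons, List.filter_filter]
        have hmx : m < x := hx
        simp [hmx, hfilt]
        omega
      · have hfilt : (recs xs).filter (fun a => decide (m < a) && decide (x < a))
            = (recs xs).filter (fun a => decide (m < a)) := by
          apply List.filter_congr
          intro a _
          by_cases h : m < a
          · have hxa : x < a := by omega
            simp [h, hxa]
          · simp [h]
        simp only [bCount, if_neg hx, ih, cnt, recs, List.filter_cons, List.filter_filter]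
        have hmx : ¬ (m < x) := hx
        simp [hmx, hfilt]

theorem lookGo_eq_g (l : List Int) : ∀ (p : List Int) (maxl : Int),
    (∀ x ∈ p, x ≤ maxl) → maxl ∈ p → lookGo maxl (recs p) l = g p l := by
  induction l with
  | nil => intro p maxl _ _; simp [lookGo, g]
  | cons w l ih =>
      intro p maxl hub hmem
      by_cases hlt : maxl < w
      · have hcnt : cnt w p = 0 := by
          simp only [cnt]
          have : (recs p).filter (fun a => decide (w < a)) = [] := by
            apply List.filter_eq_nil_iff.mpr
            intro a ha
            have := hub a (recs_subset p a ha)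
            simp; omega
          simp [this]
        have hrecs : recs (w :: p) = [w] := by
          simp only [recs]
          have : (recs p).filter (fun a => decide (w < a)) = [] := by
            apply List.filter_eq_nil_iff.mpr
            intro a ha
            have := hub a (recs_subset p a ha)
            simp; omega
          simp [this]
        have hrec := ih (w :: p) w
          (by intro x hx; rcases List.mem_cons.mp hx with h | h; omega;
              have := hub x h; omega)
          (List.mem_cons_self )
        rw [hrecs] at hrec
        simp [lookGo, hlt, g, hcnt, hrec]
      · have hpop : popAll w (recs p) = (recs p).filter (fun a => decide (w < a)) :=
          popAll_eq_filter w (recs p) (recs_sorted p)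
        have hrecs : recs (w :: p) = w :: (recs p).filter (fun a => decide (w < a)) := rfl
        have hwle : w ≤ maxl := by
          have := hmem; omega
        have hrec := ih (w :: p) maxl
          (by intro x hx; rcases List.mem_cons.mp hx with h | h; omega; exact hub x h)
          (List.mem_cons_of_mem _ hmem)
        rw [hrecs] at hrec
        simp only [lookGo, if_neg hlt, hpop, g, cnt]
        rw [hrec]

theorem g_eq_map (l : List Int) : ∀ (p : List Int),
    g p l = (List.range l.length).map
      (fun i => cnt (l.getD i 0) ((l.take i).reverse ++ p)) := by
  induction l with
  | nil => intro p; simp [g]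
  | cons w l ih =>
      intro p
      show cnt w p :: g (w :: p) l = _
      rw [ih (w :: p), List.length_cons, List.range_succ_eq_map, List.map_cons, List.map_map]
      congr 1
      apply List.map_congr_left
      intro i _
      simp [Function.comp, cnt, List.take_succ_cons]

theorem look_direction_spec : Claim_equal_look_direction := by
  intro walls _ hpre
  unfold Spec_look_direction
  match walls with
  | [] => exact absurd rfl hpre
  | w0 :: rest =>
      have hA : look_direction (w0 :: rest) = (0 : Int) :: g [w0] rest := by
        have h1 : recs [w0] = [w0] := by simp [recs]
        have := lookGo_eq_g rest [w0] w0 (by intro x hx; simp at hx; omega) (by simp)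
        rw [h1] at this
        simp [look_direction, this]
      have hB : look_direction_alt (w0 :: rest) = (0 : Int) :: g [w0] rest := by
        simp only [look_direction_alt]
        have hbc : ∀ i, bCount ((w0 :: rest).getD i 0) 0 (((w0 :: rest).take i).reverse)
            = cnt ((w0 :: rest).getD i 0) (((w0 :: rest).take i).reverse) := by
          intro i; rw [bCount_eq]; ring
        rw [List.map_congr_left (fun i _ => hbc i)]
        rw [g_eq_map rest [w0]]
        simp only [List.length_cons, List.range_succ_eq_map, List.map_cons, List.map_map]
        congr 1
        apply List.map_congr_left
        intro i _
        simp [Function.comp, cnt, List.take_succ_cons]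
      rw [hA, hB]
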